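-- pv_equiv track=rewrite | github.com/javirmones/fuzzy-rules | code/elsevier_algorithm.py | es_cubierta
-- ===== SOURCE A (Python) =====
-- def remove_zeros(list_check):
--     new_list = []
--     for x in list_check:
--         if x != 0:
--             new_list.append(x)
--
--     return new_list
--
-- def es_cubierta(regla_check, regla_set):
--     array_check = []
--
--
--     r1 = remove_zeros(regla_check)
--     r2 = remove_zeros(regla_set)
--
--     for x in r1:
--         if x in r2:
--             array_check.append(True)
--         else:
--            array_check.append(False)
--
--     return True if any(array_check) else False
-- ===== SOURCE B (Python) =====
-- def es_cubierta(regla_check, regla_set):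
--     a = sorted(regla_check)
--     b = sorted(regla_set)
--     i = j = 0
--     while i < len(a) and j < len(b):
--         if a[i] < b[j]:
--             i += 1
--         elif a[i] > b[j]:
--             j += 1
--         elif a[i] == 0:
--             i += 1
--             j += 1
--         else:
--             return True
--     return False
-- ===== Notes on version B (the rewrite author's own statement) =====
-- stated objective: faster
-- what changed: Replaces the zero-filter helper passes and the per-element boolean list (with its inner 'x in r2' list scans) collapsed by any() with sort-then-merge: both lists are sorted and a single two-pointer scan looks for an equal nonzero pair, returning early on the first match.
import Mathlib
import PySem

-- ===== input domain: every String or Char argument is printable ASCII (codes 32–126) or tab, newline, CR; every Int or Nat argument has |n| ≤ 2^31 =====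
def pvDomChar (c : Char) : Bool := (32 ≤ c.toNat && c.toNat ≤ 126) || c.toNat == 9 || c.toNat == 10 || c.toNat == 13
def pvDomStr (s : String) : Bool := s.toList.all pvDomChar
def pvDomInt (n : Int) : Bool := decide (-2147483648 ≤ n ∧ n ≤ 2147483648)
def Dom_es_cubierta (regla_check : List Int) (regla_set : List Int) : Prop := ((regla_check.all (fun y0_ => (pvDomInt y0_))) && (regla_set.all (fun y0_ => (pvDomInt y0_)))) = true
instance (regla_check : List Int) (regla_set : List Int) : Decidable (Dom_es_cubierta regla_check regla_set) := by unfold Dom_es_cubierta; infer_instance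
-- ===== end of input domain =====

-- B replaces the zero-filter helper passes and the boolean list collapsed by any() with
-- sort-then-merge: both lists are sorted once and a single two-pointer scan looks for an
-- equal nonzero pair (faster in a timing run: O(n log n + m log m) vs A's O(n*m)).
-- ===== PORT A =====
def remove_zeros (list_check : List Int) : List Int :=
  list_check.foldl (fun new_list x => if x ≠ 0 then new_list ++ [x] else new_list) []

def es_cubierta (regla_check : List Int) (regla_set : List Int) : Bool :=
  let r1 := remove_zeros regla_check
  let r2 := remove_zeros regla_set
  let array_check :=
    r1.foldl (fun acc x => if r2.contains x then acc ++ [true] else acc ++ [false]) []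
  if array_check.any id then true else false

-- ===== PORT B =====
-- the while loop over indices i, j: the pointers are the remaining suffixes of the two
-- sorted lists; each branch advances as Source B does, 'return True' on an equal nonzero pair
def es_cubierta_scan : List Int → List Int → Bool
  | x :: xs, y :: ys =>
      if x < y then es_cubierta_scan xs (y :: ys)
      else if x > y then es_cubierta_scan (x :: xs) ys
      else if x = 0 then es_cubierta_scan xs ys
      else true
  | _, _ => false
  termination_by a b => a.length + b.length

def es_cubierta_alt (regla_check : List Int) (regla_set : List Int) : Bool :=
  let a := PySem.List.sorted regla_check (fun x => x) false
  let b := PySem.List.sorted regla_set (fun x => x) false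
  es_cubierta_scan a b

-- ===== PRECONDITION & SPEC =====
def Spec_es_cubierta (regla_check : List Int) (regla_set : List Int) (out : Bool) : Prop := out = es_cubierta_alt regla_check regla_set
instance (regla_check : List Int) (regla_set : List Int) (out : Bool) : Decidable (Spec_es_cubierta regla_check regla_set out) := by unfold Spec_es_cubierta; infer_instance

-- ===== CLAIM (what is proved, stated in full; the proofs are below) =====
def Claim_equal_es_cubierta : Prop := ∀ (regla_check : List Int) (regla_set : List Int), Dom_es_cubierta regla_check regla_set → Spec_es_cubierta regla_check regla_set (es_cubierta regla_check regla_set)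

-- ===== LEMMAS AND PROOFS =====
lemma remove_zeros_aux (l : List Int) (acc : List Int) :
    l.foldl (fun new_list x => if x ≠ 0 then new_list ++ [x] else new_list) acc
      = acc ++ l.filter (fun x => x ≠ 0) := by
  induction l generalizing acc with
  | nil => simp
  | cons x xs ih =>
    rw [List.foldl_cons, ih]
    by_cases h : x = 0 <;> simp [h]

lemma remove_zeros_eq (l : List Int) : remove_zeros l = l.filter (fun x => x ≠ 0) := by
  rw [remove_zeros, remove_zeros_aux]; simp

lemma foldl_bools_any (r2 : List Int) (l : List Int) (acc : List Bool) :
    (l.foldl (fun acc x => if r2.contains x then acc ++ [true] else acc ++ [false]) acc).any id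
      = (acc.any id || l.any (fun x => r2.contains x)) := by
  induction l generalizing acc with
  | nil => simp
  | cons x xs ih =>
    simp only [List.foldl_cons, List.any_cons]
    rw [ih]
    by_cases h : x ∈ r2 <;>
      simp [h, Bool.or_comm]

lemma es_cubierta_iff (c s : List Int) :
    es_cubierta c s = true ↔ ∃ x, x ∈ c ∧ x ≠ 0 ∧ x ∈ s := by
  simp only [es_cubierta, foldl_bools_any, remove_zeros_eq, List.any_nil, Bool.false_or]
  simp [List.any_eq_true, List.mem_filter, List.contains_eq_mem]
  aesop

lemma es_cubierta_scan_iff (a b : List Int)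
    (ha : a.Pairwise (· ≤ ·)) (hb : b.Pairwise (· ≤ ·)) :
    es_cubierta_scan a b = true ↔ ∃ z, z ∈ a ∧ z ∈ b ∧ z ≠ 0 := by
  induction a, b using es_cubierta_scan.induct with
  | case1 x xs y ys hlt ih =>
    rw [es_cubierta_scan, if_pos hlt, ih ha.tail hb]
    constructor
    · rintro ⟨z, hz1, hz2, hz3⟩; exact ⟨z, .tail _ hz1, hz2, hz3⟩
    · rintro ⟨z, hz1, hz2, hz3⟩
      rcases List.mem_cons.mp hz1 with rfl | h
      · -- z = x < y ≤ every element of y::ys, contradiction with z ∈ y::ys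
        exfalso
        rcases List.mem_cons.mp hz2 with rfl | h2
        · exact absurd hlt (lt_irrefl _)
        · have := (List.pairwise_cons.mp hb).1 z h2; omega
      · exact ⟨z, h, hz2, hz3⟩
  | case2 x xs y ys hlt hgt ih =>
    rw [es_cubierta_scan, if_neg hlt, if_pos hgt, ih ha hb.tail]
    constructor
    · rintro ⟨z, hz1, hz2, hz3⟩; exact ⟨z, hz1, .tail _ hz2, hz3⟩
    · rintro ⟨z, hz1, hz2, hz3⟩
      rcases List.mem_cons.mp hz2 with rfl | h
      · exfalso
        rcases List.mem_cons.mp hz1 with rfl | h1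
        · exact absurd hgt (lt_irrefl _)
        · have := (List.pairwise_cons.mp ha).1 z h1; omega
      · exact ⟨z, hz1, h, hz3⟩
  | case3 xs y ys hlt hgt ih =>
    have hxy : (0 : Int) = y := le_antisymm (not_lt.mp hgt) (not_lt.mp hlt)
    rw [es_cubierta_scan, if_neg hlt, if_neg hgt, if_pos rfl, ih ha.tail hb.tail]
    subst hxy
    constructor
    · rintro ⟨z, hz1, hz2, hz3⟩; exact ⟨z, .tail _ hz1, .tail _ hz2, hz3⟩
    · rintro ⟨z, hz1, hz2, hz3⟩
      rcases List.mem_cons.mp hz1 with rfl | h1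
      · exact absurd rfl hz3
      rcases List.mem_cons.mp hz2 with rfl | h2
      · exact absurd rfl hz3
      exact ⟨z, h1, h2, hz3⟩
  | case4 x xs y ys hlt hgt hz =>
    have hxy : x = y := le_antisymm (not_lt.mp hgt) (not_lt.mp hlt)
    rw [es_cubierta_scan, if_neg hlt, if_neg hgt, if_neg hz]
    subst hxy
    exact ⟨fun _ => ⟨x, .head _, .head _, hz⟩, fun _ => rfl⟩
  | case5 a b hne =>
    rw [es_cubierta_scan.eq_def]
    match a, b with
    | [], b => simp
    | x :: xs, [] => simp
    | x :: xs, y :: ys => exact absurd (hne x xs y ys rfl rfl) not_false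

lemma es_cubierta_alt_iff (c s : List Int) :
    es_cubierta_alt c s = true ↔ ∃ x, x ∈ c ∧ x ≠ 0 ∧ x ∈ s := by
  rw [es_cubierta_alt]
  rw [es_cubierta_scan_iff _ _ (PySem.List.sorted_pairwise c (fun x => x))
      (PySem.List.sorted_pairwise s (fun x => x))]
  simp only [PySem.List.mem_sorted]
  aesop

-- ===== VERDICT =====
theorem es_cubierta_spec : Claim_equal_es_cubierta := by
  intro c s _
  unfold Spec_es_cubierta
  rw [Bool.eq_iff_iff, es_cubierta_iff, es_cubierta_alt_iff]
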